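-- pv_equiv track=rewrite | github.com/DimaDBRK/DI-Bootcamp | Week2/Day4/DailyChallenge/scrypt.py | encode_option1
-- ===== SOURCE A (Python) =====
-- def encode_option1(in_list):
--     res_string = ""
--     space = ""
--     for i in range(len(in_list[0])):
--         for j in in_list:
--             if j[i].isalpha():
--                 res_string += space
--                 space = ""
--                 res_string += j[i]
--             else:
--                 if len(res_string) > 0:
--                     space = " "
--     return res_string
-- ===== SOURCE B (Python) =====
-- def encode_option1(in_list):
--     # Materialize the column-major character stream (same IndexError behaviour
--     # as A on empty/ragged input), tokenize it into maximal alphabetic words,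
--     # then join the words with single spaces.
--     chars = [row[i] for i in range(len(in_list[0])) for row in in_list]
--     words = []
--     current = ""
--     for c in chars:
--         if c.isalpha():
--             current += c
--         else:
--             if current:
--                 words.append(current)
--             current = ""
--     if current:
--         words.append(current)
--     return " ".join(words)
-- ===== Notes on version B (the rewrite author's own statement) =====
-- stated objective: idiomatic
-- what changed: A's single stateful pass with a pending-space flag is replaced by a materialize-then-tokenize-then-join decomposition: build the column-major character stream, cut it into maximal alphabetic words, and join the words with ' '.
import Mathlib
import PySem

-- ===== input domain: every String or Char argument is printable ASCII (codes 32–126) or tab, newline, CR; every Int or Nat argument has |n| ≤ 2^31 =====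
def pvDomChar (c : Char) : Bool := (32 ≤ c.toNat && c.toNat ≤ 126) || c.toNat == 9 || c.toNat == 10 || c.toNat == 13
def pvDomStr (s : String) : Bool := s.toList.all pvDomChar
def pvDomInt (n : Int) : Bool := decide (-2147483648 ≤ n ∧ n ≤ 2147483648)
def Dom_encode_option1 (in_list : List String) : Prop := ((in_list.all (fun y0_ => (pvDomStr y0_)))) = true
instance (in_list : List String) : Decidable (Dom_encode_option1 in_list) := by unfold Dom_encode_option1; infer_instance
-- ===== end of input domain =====

-- B rebuilds A's single stateful pending-space pass as materialize-the-column-major-stream,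
-- tokenize into words, join with spaces (objective: idiomatic decomposition; not faster).

-- ===== PORT A =====
-- loop body of A's inner for (res_string, space as List Char)
def pvStepA (st : List Char × List Char) (c : Char) : List Char × List Char :=
  if PySem.Chars.isalpha c then (st.1 ++ st.2 ++ [c], [])
  else (st.1, if st.1.length > 0 then [' '] else st.2)

def encode_option1 (in_list : List String) : String :=
  let st := (PySem.List.pyRange 0 (PySem.Str.len (PySem.List.pyGetD in_list 0 "")) 1).foldl
    (fun st i => in_list.foldl
      (fun st j =>
        match PySem.Str.pyGet? j i with  -- j[i]; none = IndexError, excluded by Pre_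
        | some c => pvStepA st c
        | none => st) st)
    (([] : List Char), ([] : List Char))
  String.ofList st.1

-- ===== PORT B =====
-- loop body of B's tokenizer (words, current)
def pvStepB (st : List (List Char) × List Char) (c : Char) : List (List Char) × List Char :=
  if PySem.Chars.isalpha c then (st.1, st.2 ++ [c])
  else ((if st.2 ≠ [] then st.1 ++ [st.2] else st.1), [])

def encode_option1_alt (in_list : List String) : String :=
  -- chars = [row[i] for i in range(len(in_list[0])) for row in in_list]
  let chars := (PySem.List.pyRange 0 (PySem.Str.len (PySem.List.pyGetD in_list 0 "")) 1).foldl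
    (fun acc i => in_list.foldl
      (fun acc row =>
        match PySem.Str.pyGet? row i with  -- row[i]; none = IndexError, excluded by Pre_
        | some c => acc ++ [c]
        | none => acc) acc)
    ([] : List Char)
  let st := chars.foldl pvStepB (([] : List (List Char)), ([] : List Char))
  let words := if st.2 ≠ [] then st.1 ++ [st.2] else st.1
  PySem.Str.join " " (words.map String.ofList)

-- ===== PRECONDITION & SPEC =====
-- Pre_ excludes exactly the inputs on which A raises IndexError: the empty list
-- (in_list[0]) and ragged inputs with a row shorter than the first row (j[i]).
def Pre_encode_option1 (in_list : List String) : Prop :=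
  in_list ≠ [] ∧ ∀ s ∈ in_list, (in_list.headD "").toList.length ≤ s.toList.length
instance (in_list : List String) : Decidable (Pre_encode_option1 in_list) := by
  unfold Pre_encode_option1; infer_instance
def pvWitness_encode_option1 : List String := ["ab1c", "x,2yz"]
def Spec_encode_option1 (in_list : List String) (out : String) : Prop := out = encode_option1_alt in_list
instance (in_list : List String) (out : String) : Decidable (Spec_encode_option1 in_list out) := by unfold Spec_encode_option1; infer_instance

-- ===== CLAIM (what is proved, stated in full; the proofs are below) =====
def Claim_equal_encode_option1 : Prop := ∀ (in_list : List String), Dom_encode_option1 in_list → Pre_encode_option1 in_list → Spec_encode_option1 in_list (encode_option1 in_list)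

-- ===== LEMMAS AND PROOFS =====

-- the column-major character stream both ports traverse
def pvCols (in_list : List String) (n : Int) : List Char :=
  (PySem.List.pyRange 0 n 1).flatMap
    (fun i => in_list.filterMap (fun j => PySem.Str.pyGet? j i))

-- result string / pending-space of A, expressed from B's tokenizer state
def pvRender (ws : List (List Char)) (cur : List Char) : List Char :=
  PySem.Chars.join [' '] (if cur = [] then ws else ws ++ [cur])
def pvSp (ws : List (List Char)) (cur : List Char) : List Char :=
  if cur = [] ∧ ws ≠ [] then [' '] else []

-- a fold that skips 'none' elements is a fold over the filterMap
theorem pv_foldl_filterMap {σ : Type} (step : σ → Char → σ) (rows : List String) (i : Int) :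
    ∀ st : σ, rows.foldl
      (fun st j => match PySem.Str.pyGet? j i with
        | some c => step st c
        | none => st) st
      = (rows.filterMap (fun j => PySem.Str.pyGet? j i)).foldl step st := by
  induction rows with
  | nil => intro st; rfl
  | cons r rs ih =>
    intro st
    simp only [List.foldl_cons, List.filterMap_cons]
    cases PySem.Str.pyGet? r i with
    | none => exact ih st
    | some c => simp only [List.foldl_cons]; exact ih (step st c)

-- a nested fold is a fold over the flatMap
theorem pv_foldl_flatMap {σ α β : Type} (step : σ → β → σ) (g : α → List β) (l : List α) :
    ∀ st : σ, l.foldl (fun st i => (g i).foldl step st) st = (l.flatMap g).foldl step st := by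
  induction l with
  | nil => intro st; rfl
  | cons x xs ih => intro st; simp only [List.foldl_cons, List.flatMap_cons, List.foldl_append]; exact ih _

theorem pv_chars_eq (in_list : List String) (n : Int) :
    (PySem.List.pyRange 0 n 1).foldl
      (fun acc i => in_list.foldl
        (fun acc row =>
          match PySem.Str.pyGet? row i with
          | some c => acc ++ [c]
          | none => acc) acc)
      ([] : List Char) = pvCols in_list n := by
  have h : ∀ i (acc : List Char), in_list.foldl
      (fun acc row =>
        match PySem.Str.pyGet? row i with
        | some c => acc ++ [c]
        | none => acc) acc
      = acc ++ in_list.filterMap (fun j => PySem.Str.pyGet? j i) := by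
    intro i acc
    rw [pv_foldl_filterMap (fun acc c => acc ++ [c]) in_list i acc]
    generalize in_list.filterMap (fun j => PySem.Str.pyGet? j i) = l
    induction l generalizing acc with
    | nil => simp
    | cons c cs ih => simp [ih]
  unfold pvCols
  generalize PySem.List.pyRange 0 n 1 = r
  have hgen : ∀ (r : List Int) (acc : List Char),
      r.foldl (fun acc i => acc ++ in_list.filterMap (fun j => PySem.Str.pyGet? j i)) acc
        = acc ++ r.flatMap (fun i => in_list.filterMap (fun j => PySem.Str.pyGet? j i)) := by
    intro r
    induction r with
    | nil => intro acc; simp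
    | cons x xs ih => intro acc; simp only [List.foldl_cons, List.flatMap_cons, ih]; simp
  rw [PySem.List.foldl_congr_mem _ _
      (fun acc i => acc ++ in_list.filterMap (fun j => PySem.Str.pyGet? j i)) _
      (fun acc i _ => h i acc), hgen]
  simp

theorem pv_A_eq_fold (in_list : List String) (n : Int) :
    (PySem.List.pyRange 0 n 1).foldl
      (fun st i => in_list.foldl
        (fun st j =>
          match PySem.Str.pyGet? j i with
          | some c => pvStepA st c
          | none => st) st)
      (([] : List Char), ([] : List Char))
    = (pvCols in_list n).foldl pvStepA ([], []) := by
  unfold pvCols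
  rw [← pv_foldl_flatMap]
  exact PySem.List.foldl_congr_mem _ _ _ _
    (fun st i _ => pv_foldl_filterMap pvStepA in_list i st)

-- join over a snoc
theorem pv_join_snoc (ws : List (List Char)) (w : List Char) :
    PySem.Chars.join [' '] (ws ++ [w]) =
      if ws = [] then w else PySem.Chars.join [' '] ws ++ ' ' :: w := by
  induction ws with
  | nil => simp [PySem.Chars.join_singleton]
  | cons a t ih =>
    cases t with
    | nil => simp [PySem.Chars.join_singleton, PySem.Chars.join_cons_cons]
    | cons b l =>
      have ih2 : PySem.Chars.join [' '] (b :: (l ++ [w]))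
          = PySem.Chars.join [' '] (b :: l) ++ ' ' :: w := by simpa using ih
      simp [PySem.Chars.join_cons_cons, ih2]

theorem pv_join_cons_ne_nil (w : List Char) (t : List (List Char)) (hw : w ≠ []) :
    PySem.Chars.join [' '] (w :: t) ≠ [] := by
  cases t with
  | nil => simpa [PySem.Chars.join_singleton] using hw
  | cons b l => simp [PySem.Chars.join_cons_cons]

-- the central invariant: A's flag-based fold tracks B's tokenizer
theorem pv_inv (cs : List Char) :
    ∀ (ws : List (List Char)) (cur : List Char), (∀ w ∈ ws, w ≠ []) →
      cs.foldl pvStepA (pvRender ws cur, pvSp ws cur)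
        = (pvRender (cs.foldl pvStepB (ws, cur)).1 (cs.foldl pvStepB (ws, cur)).2,
           pvSp (cs.foldl pvStepB (ws, cur)).1 (cs.foldl pvStepB (ws, cur)).2)
      ∧ (∀ w ∈ (cs.foldl pvStepB (ws, cur)).1, w ≠ []) := by
  induction cs with
  | nil => intro ws cur h; exact ⟨rfl, h⟩
  | cons c rest ih =>
    intro ws cur h
    simp only [List.foldl_cons]
    have hstep : pvStepA (pvRender ws cur, pvSp ws cur) c
        = (pvRender (pvStepB (ws, cur) c).1 (pvStepB (ws, cur) c).2,
           pvSp (pvStepB (ws, cur) c).1 (pvStepB (ws, cur) c).2) := by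
      unfold pvStepA pvStepB pvRender pvSp
      by_cases ha : PySem.Chars.isalpha c = true
      · simp only [ha, if_true]
        by_cases hc : cur = []
        · subst hc
          by_cases hw : ws = []
          · subst hw; simp [PySem.Chars.join_nil, PySem.Chars.join_singleton]
          · simp [hw, pv_join_snoc]
        · simp only [hc, if_false]
          by_cases hw : ws = [] <;> simp [pv_join_snoc, hw]
      · simp only [Bool.not_eq_true] at ha
        simp only [ha, Bool.false_eq_true, if_false]
        by_cases hc : cur = []
        · subst hc
          by_cases hw : ws = []
          · subst hw; simp [PySem.Chars.join_nil]
          · obtain ⟨w, t, rfl⟩ : ∃ w t, ws = w :: t := by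
              cases ws with | nil => exact absurd rfl hw | cons w t => exact ⟨w, t, rfl⟩
            have hne := pv_join_cons_ne_nil w t (h w (by simp))
            simp [hw, List.length_pos_iff, hne]
        · have hne : PySem.Chars.join [' '] (ws ++ [cur]) ≠ [] := by
            rw [pv_join_snoc]
            by_cases hw : ws = [] <;> simp [hw, hc]
          simp [hc, hne, List.length_pos_iff]
    rw [hstep]
    apply ih
    intro w hw
    unfold pvStepB at hw
    by_cases ha : PySem.Chars.isalpha c = true
    · simp only [ha, if_true] at hw; exact h w hw
    · simp only [Bool.not_eq_true] at ha
      simp only [ha, Bool.false_eq_true, if_false] at hw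
      by_cases hc : cur = []
      · simp only [hc, ne_eq, not_true_eq_false, if_false] at hw; exact h w hw
      · simp only [hc, ne_eq, not_false_eq_true, if_true, List.mem_append, List.mem_singleton] at hw
        rcases hw with hw | rfl
        · exact h w hw
        · exact hc

-- joining the words with " " is rendering
theorem pv_join_words (ws : List (List Char)) (cur : List Char) :
    PySem.Str.join " " ((if cur ≠ [] then ws ++ [cur] else ws).map String.ofList)
      = String.ofList (pvRender ws cur) := by
  have hjoin : ∀ l : List (List Char),
      PySem.Str.join " " (l.map String.ofList) = String.ofList (PySem.Chars.join [' '] l) := by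
    intro l
    have h1 : (PySem.Str.join " " (l.map String.ofList)).toList = PySem.Chars.join [' '] l := by
      have hmap : List.map String.toList (List.map String.ofList l) = l := by
        induction l with
        | nil => rfl
        | cons a t ih => simp only [List.map_cons, String.toList_ofList, ih]
      rw [PySem.Str.toList_join, show (" " : String).toList = [' '] from by decide, hmap]
    calc PySem.Str.join " " (l.map String.ofList)
        = String.ofList (PySem.Str.join " " (l.map String.ofList)).toList :=
          (String.ofList_toList).symm
      _ = String.ofList (PySem.Chars.join [' '] l) := by rw [h1]
  unfold pvRender
  by_cases hc : cur = []
  · rw [if_pos hc, if_neg (by simp [hc])]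
    exact hjoin ws
  · rw [if_neg hc, if_pos hc]
    exact hjoin (ws ++ [cur])

-- ===== VERDICT (by name: the statement is the Claim_ definition above) =====
theorem encode_option1_spec : Claim_equal_encode_option1 := by
  intro in_list _ _
  unfold Spec_encode_option1 encode_option1 encode_option1_alt
  simp only
  rw [pv_A_eq_fold, pv_chars_eq]
  have h0 : (∀ w ∈ ([] : List (List Char)), w ≠ []) := by simp
  have := pv_inv (pvCols in_list (PySem.Str.len (PySem.List.pyGetD in_list 0 ""))) [] [] h0
  have hinit : (pvRender [] [], pvSp [] []) = (([] : List Char), ([] : List Char)) := by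
    simp [pvRender, pvSp, PySem.Chars.join_nil]
  rw [← hinit]
  rw [this.1]
  exact (pv_join_words _ _).symm
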